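-- pv_equiv track=rewrite | github.com/Maharshi-n/btp-assistant | app/permissions/policy.py | human_readable_prompt
-- ===== SOURCE A (Python) =====
-- def human_readable_prompt(tool_name: str, args: dict) -> str:
--     """Return a short human-readable approval prompt for the UI card."""
--     if tool_name == "run_shell_command":
--         cmd = args.get("command", "?")
--         if len(cmd) > 200:
--             cmd = cmd[:200] + "…"
--         return f"Run shell command: {cmd}"
--     if tool_name == "delete_file":
--         path = args.get("path", "?")
--         return f"Delete file: {path}"
--     if tool_name == "write_file":
--         path = args.get("path", "?")
--         return f"Overwrite existing file: {path}"
--     if tool_name == "gmail_send":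
--         to = args.get("to", "?")
--         subject = args.get("subject", "?")
--         return f"Send email to {to} — Subject: {subject}"
--     if tool_name == "drive_write":
--         name = args.get("name", "?")
--         return f"Write file to Google Drive: {name}"
--     if tool_name == "drive_upload":
--         file_path = args.get("file_path", "?")
--         name = args.get("name", "") or file_path
--         return f"Upload '{name}' to Google Drive"
--     if tool_name == "calendar_create_event":
--         summary = args.get("summary", "?")
--         start = args.get("start", "?")
--         return f"Create calendar event: {summary} at {start}"
--     # Generic fallback
--     arg_str = ", ".join(f"{k}={v!r}" for k, v in list(args.items())[:3])
--     return f"Run {tool_name}({arg_str})"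
-- ===== SOURCE B (Python) =====
-- # Table-driven re-implementation: each known tool is a (pieces, fields) template
-- # interpreted by one generic filler; unknown tools use the generic repr fallback.
--
-- _SPECS = {
--     "run_shell_command": (["Run shell command: ", ""], [(["command"], "?", True)]),
--     "delete_file": (["Delete file: ", ""], [(["path"], "?", False)]),
--     "write_file": (["Overwrite existing file: ", ""], [(["path"], "?", False)]),
--     "gmail_send": (["Send email to ", " \u2014 Subject: ", ""],
--                    [(["to"], "?", False), (["subject"], "?", False)]),
--     "drive_write": (["Write file to Google Drive: ", ""], [(["name"], "?", False)]),
--     "drive_upload": (["Upload '", "' to Google Drive"],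
--                      [(["name", "file_path"], "?", False)]),
--     "calendar_create_event": (["Create calendar event: ", " at ", ""],
--                               [(["summary"], "?", False), (["start"], "?", False)]),
-- }
--
--
-- def _field(args, spec):
--     keys, default, truncate = spec
--     v = None
--     for k in keys[:-1]:
--         u = args.get(k)
--         if u:
--             v = u
--             break
--     if v is None:
--         v = args.get(keys[-1], default)
--     if truncate and len(v) > 200:
--         v = v[:200] + "\u2026"
--     return v
--
--
-- def human_readable_prompt(tool_name: str, args: dict) -> str:
--     spec = _SPECS.get(tool_name)
--     if spec is None:
--         arg_str = ", ".join(f"{k}={v!r}" for k, v in list(args.items())[:3])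
--         return f"Run {tool_name}({arg_str})"
--     pieces, fields = spec
--     out = pieces[0]
--     for piece, f in zip(pieces[1:], fields):
--         out += _field(args, f) + piece
--     return out
-- ===== Notes on version B (the rewrite author's own statement) =====
-- stated objective: alternative
-- what changed: Replaced the if-elif chain of inline f-strings with a data table mapping each tool name to a (pieces, field-specs) template interpreted by one generic filler (key-fallback chain, optional truncation), keeping the same repr-based generic fallback for unknown tools.
import Mathlib
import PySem

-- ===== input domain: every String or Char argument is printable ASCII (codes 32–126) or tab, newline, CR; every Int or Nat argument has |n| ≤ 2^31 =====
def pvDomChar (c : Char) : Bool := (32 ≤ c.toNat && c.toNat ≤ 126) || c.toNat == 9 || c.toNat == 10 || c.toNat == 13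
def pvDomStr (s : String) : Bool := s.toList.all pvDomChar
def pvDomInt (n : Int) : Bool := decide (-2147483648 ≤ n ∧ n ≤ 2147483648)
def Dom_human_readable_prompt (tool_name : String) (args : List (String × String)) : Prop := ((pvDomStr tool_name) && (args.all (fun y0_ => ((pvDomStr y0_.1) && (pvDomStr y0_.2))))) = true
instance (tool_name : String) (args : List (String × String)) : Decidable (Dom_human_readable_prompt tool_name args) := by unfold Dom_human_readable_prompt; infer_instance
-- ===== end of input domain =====

-- B replaces A's if-elif chain of inline f-strings by a data table of (pieces, fields)
-- templates interpreted by one generic filler (objective: alternative, table-driven).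


-- ===== SHARED PYTHON PRIMITIVES (used by both ports) =====
-- dict.get(k, d) on the association list of a Python dict (dict keys are unique, so first match is exact)
def pvDictGet (args : List (String × String)) (k d : String) : String :=
  match args.find? (fun p => p.1 == k) with
  | some p => p.2
  | none => d

-- dict.get(k) (default None)
def pvDictGet? (args : List (String × String)) (k : String) : Option String :=
  (args.find? (fun p => p.1 == k)).map (·.2)

-- repr(v) for a str — hand port, exact on strings of printable ASCII plus tab/newline/CR (= Dom)
def pvReprChars (s : List Char) : List Char :=
  let q : Char := if s.contains '\'' && !s.contains '"' then '"' else '\''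
  q :: s.flatMap (fun c =>
    if c = '\\' then ['\\', '\\']
    else if c = q then ['\\', q]
    else if c = '\n' then ['\\', 'n']
    else if c = '\r' then ['\\', 'r']
    else if c = '\t' then ['\\', 't']
    else [c]) ++ [q]

-- the generic fallback, textually identical in both Pythons:
--   arg_str = ", ".join(f"{k}={v!r}" for k, v in list(args.items())[:3]); return f"Run {tool_name}({arg_str})"
def pvGenericPrompt (tool_name : String) (args : List (String × String)) : String :=
  let argStr := List.intercalate (", ".toList) ((args.take 3).map (fun p => p.1.toList ++ '=' :: pvReprChars p.2.toList))
  String.ofList ("Run ".toList ++ tool_name.toList ++ '(' :: argStr ++ [')'])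

-- ===== PORT A =====
def human_readable_prompt (tool_name : String) (args : List (String × String)) : String :=
  if tool_name == "run_shell_command" then
    let cmd := (pvDictGet args "command" "?").toList
    let cmd := if 200 < cmd.length then cmd.take 200 ++ ['…'] else cmd
    String.ofList ("Run shell command: ".toList ++ cmd)
  else if tool_name == "delete_file" then
    String.ofList ("Delete file: ".toList ++ (pvDictGet args "path" "?").toList)
  else if tool_name == "write_file" then
    String.ofList ("Overwrite existing file: ".toList ++ (pvDictGet args "path" "?").toList)
  else if tool_name == "gmail_send" then
    String.ofList ("Send email to ".toList ++ (pvDictGet args "to" "?").toList ++ " — Subject: ".toList ++ (pvDictGet args "subject" "?").toList)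
  else if tool_name == "drive_write" then
    String.ofList ("Write file to Google Drive: ".toList ++ (pvDictGet args "name" "?").toList)
  else if tool_name == "drive_upload" then
    let file_path := pvDictGet args "file_path" "?"
    let nm := pvDictGet args "name" ""
    let name := if nm == "" then file_path else nm   -- `or` on strings: falsy = empty
    String.ofList ("Upload '".toList ++ name.toList ++ "' to Google Drive".toList)
  else if tool_name == "calendar_create_event" then
    String.ofList ("Create calendar event: ".toList ++ (pvDictGet args "summary" "?").toList ++ " at ".toList ++ (pvDictGet args "start" "?").toList)
  else
    pvGenericPrompt tool_name args

-- ===== PORT B =====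
-- a field spec: (fallback key chain, default, truncate?)
abbrev PvField := List String × String × Bool

def pvSpecs : List (String × (List String × List PvField)) :=
  [("run_shell_command", (["Run shell command: ", ""], [(["command"], "?", true)])),
   ("delete_file", (["Delete file: ", ""], [(["path"], "?", false)])),
   ("write_file", (["Overwrite existing file: ", ""], [(["path"], "?", false)])),
   ("gmail_send", (["Send email to ", " — Subject: ", ""], [(["to"], "?", false), (["subject"], "?", false)])),
   ("drive_write", (["Write file to Google Drive: ", ""], [(["name"], "?", false)])),
   ("drive_upload", (["Upload '", "' to Google Drive"], [(["name", "file_path"], "?", false)])),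
   ("calendar_create_event", (["Create calendar event: ", " at ", ""], [(["summary"], "?", false), (["start"], "?", false)]))]

-- _field's key-chain loop: non-last keys count only when present and truthy; last key via get(k, default)
def pvChainGet (args : List (String × String)) (keys : List String) (dflt : String) : String :=
  match keys with
  | [] => dflt       -- not reached: every chain in pvSpecs is nonempty
  | [k] => pvDictGet args k dflt
  | k :: rest =>
    match pvDictGet? args k with
    | some u => if u == "" then pvChainGet args rest dflt else u
    | none => pvChainGet args rest dflt

def pvField (args : List (String × String)) (f : PvField) : List Char :=
  let v := (pvChainGet args f.1 f.2.1).toList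
  if f.2.2 && decide (200 < v.length) then v.take 200 ++ ['…'] else v

-- the zip loop:  for piece, f in zip(pieces[1:], fields): out += _field(args, f) + piece
def pvFill (args : List (String × String)) (pieces : List String) (fields : List PvField) : List Char :=
  match pieces, fields with
  | p :: ps, f :: fs => pvField args f ++ p.toList ++ pvFill args ps fs
  | _, _ => []

def human_readable_prompt_alt (tool_name : String) (args : List (String × String)) : String :=
  match pvSpecs.find? (fun p => p.1 == tool_name) with
  | none => pvGenericPrompt tool_name args
  | some (_, pieces, fields) =>
    match pieces with
    | [] => ""       -- not reached: every spec has a first piece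
    | p0 :: rest => String.ofList (p0.toList ++ pvFill args rest fields)

-- ===== PRECONDITION & SPEC =====
def Spec_human_readable_prompt (tool_name : String) (args : List (String × String)) (out : String) : Prop := out = human_readable_prompt_alt tool_name args
instance (tool_name : String) (args : List (String × String)) (out : String) : Decidable (Spec_human_readable_prompt tool_name args out) := by unfold Spec_human_readable_prompt; infer_instance

-- ===== CLAIM (what is proved, stated in full; the proofs are below) =====
def Claim_equal_human_readable_prompt : Prop := ∀ (tool_name : String) (args : List (String × String)), Dom_human_readable_prompt tool_name args → Spec_human_readable_prompt tool_name args (human_readable_prompt tool_name args)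

-- ===== LEMMAS AND PROOFS =====

-- ===== VERDICT (by name: the statement is the Claim_ definition above) =====
theorem human_readable_prompt_spec : Claim_equal_human_readable_prompt := by
  intro tool_name args _
  unfold Spec_human_readable_prompt
  by_cases h1 : tool_name = "run_shell_command"
  · subst h1
    simp [human_readable_prompt, human_readable_prompt_alt, pvSpecs, pvFill, pvField, pvChainGet]
  by_cases h2 : tool_name = "delete_file"
  · subst h2
    simp [human_readable_prompt, human_readable_prompt_alt, pvSpecs, pvFill, pvField, pvChainGet]
  by_cases h3 : tool_name = "write_file"
  · subst h3
    simp [human_readable_prompt, human_readable_prompt_alt, pvSpecs, pvFill, pvField, pvChainGet]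
  by_cases h4 : tool_name = "gmail_send"
  · subst h4
    simp [human_readable_prompt, human_readable_prompt_alt, pvSpecs, pvFill, pvField, pvChainGet]
  by_cases h5 : tool_name = "drive_write"
  · subst h5
    simp [human_readable_prompt, human_readable_prompt_alt, pvSpecs, pvFill, pvField, pvChainGet]
  by_cases h6 : tool_name = "drive_upload"
  · subst h6
    cases hn : args.find? (fun p => p.1 == "name") with
    | none =>
      simp [human_readable_prompt, human_readable_prompt_alt, pvSpecs, pvFill, pvField, pvChainGet,
            pvDictGet, pvDictGet?, hn]
    | some p =>
      by_cases hp : p.2 = ""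
      · simp [human_readable_prompt, human_readable_prompt_alt, pvSpecs, pvFill, pvField, pvChainGet,
              pvDictGet, pvDictGet?, hn, hp]
      · simp [human_readable_prompt, human_readable_prompt_alt, pvSpecs, pvFill, pvField, pvChainGet,
              pvDictGet, pvDictGet?, hn, hp]
  by_cases h7 : tool_name = "calendar_create_event"
  · subst h7
    simp [human_readable_prompt, human_readable_prompt_alt, pvSpecs, pvFill, pvField, pvChainGet]
  · simp [human_readable_prompt, human_readable_prompt_alt, pvSpecs, List.find?,
          beq_eq_false_iff_ne.mpr h1, beq_eq_false_iff_ne.mpr h2, beq_eq_false_iff_ne.mpr h3,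
          beq_eq_false_iff_ne.mpr h4, beq_eq_false_iff_ne.mpr h5, beq_eq_false_iff_ne.mpr h6,
          beq_eq_false_iff_ne.mpr h7,
          beq_eq_false_iff_ne.mpr (Ne.symm h1), beq_eq_false_iff_ne.mpr (Ne.symm h2),
          beq_eq_false_iff_ne.mpr (Ne.symm h3), beq_eq_false_iff_ne.mpr (Ne.symm h4),
          beq_eq_false_iff_ne.mpr (Ne.symm h5), beq_eq_false_iff_ne.mpr (Ne.symm h6),
          beq_eq_false_iff_ne.mpr (Ne.symm h7)]
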